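-- pv_equiv track=rewrite | github.com/spacewall/advanced | testing/main_for_collections.py | ordered_sequence
-- ===== SOURCE A (Python) =====
-- def ordered_sequence(courses, mentors, durations) -> list:
--     courses_list = []
--
--     for course, mentor, duration in zip(courses, mentors, durations):
--         course_dict = {"title": course, "mentors": mentor, "duration": duration}
--         courses_list.append(course_dict)
--
--     durations_dict = {}
--
--     for id, item in enumerate(courses_list):
--         if item["duration"] in durations_dict.keys():
--             durations_dict[item["duration"]].append(id)
--         else:
--             durations_dict[item["duration"]] = [id]
--
--     durations_dict = dict(sorted(durations_dict.items()))
--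
--     result = list()
--
--     for key, value in durations_dict.items():
--         for el in value:
--             result.append(f'{courses_list[el].get("title")} - {key} месяцев')
--
--     return result
-- ===== SOURCE B (Python) =====
-- def ordered_sequence(courses, mentors, durations) -> list:
--     triples = sorted(zip(courses, mentors, durations), key=lambda t: t[2])
--     return [f'{title} - {duration} месяцев' for title, _mentor, duration in triples]
-- ===== Notes on version B (the rewrite author's own statement) =====
-- stated objective: simpler
-- what changed: Replaces the dict-of-courses build, index grouping dict, sorted-items rebuild and nested emit loops by one stable sort of the zipped triples keyed on duration plus a single formatting pass (equal durations keep original order by sort stability).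
import Mathlib
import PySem

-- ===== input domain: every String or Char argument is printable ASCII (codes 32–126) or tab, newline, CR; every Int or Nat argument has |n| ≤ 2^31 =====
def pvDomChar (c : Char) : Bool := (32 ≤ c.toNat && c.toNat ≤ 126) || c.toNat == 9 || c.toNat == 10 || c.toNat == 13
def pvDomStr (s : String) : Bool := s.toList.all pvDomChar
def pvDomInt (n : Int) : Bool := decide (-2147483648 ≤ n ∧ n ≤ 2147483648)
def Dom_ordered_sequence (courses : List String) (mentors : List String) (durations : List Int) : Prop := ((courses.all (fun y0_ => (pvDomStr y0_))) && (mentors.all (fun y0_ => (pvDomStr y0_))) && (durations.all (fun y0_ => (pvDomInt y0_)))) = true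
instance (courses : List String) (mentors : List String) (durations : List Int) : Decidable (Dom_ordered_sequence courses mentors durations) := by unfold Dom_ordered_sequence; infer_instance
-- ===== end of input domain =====

-- B replaces A's grouping dict and nested emit loops by one stable sort of the zipped triples keyed on duration plus a single formatting pass (simpler).


-- ===== PORT A =====
-- course_dict {"title","mentors","duration"} is ported as the triple (title, (mentor, duration)).
def ordered_sequence (courses : List String) (mentors : List String) (durations : List Int) : List String :=
  let courses_list := (courses.zip (mentors.zip durations)).foldl (fun acc x => acc ++ [x]) []
  let durations_dict := (PySem.List.enumerate courses_list).foldl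
      (fun d p => if d.contains p.2.2.2 then d.insert p.2.2.2 (d.getD p.2.2.2 [] ++ [p.1])
                  else d.insert p.2.2.2 [p.1]) PySem.Dict.empty
  -- dict(sorted(durations_dict.items())): the int keys are distinct, so Python's tuple
  -- comparison never reaches the list component and orders by the key alone.
  let sorted_items := PySem.List.sorted durations_dict.items (fun kv => kv.1)
  sorted_items.foldl (fun result kv =>
    kv.2.foldl (fun result el =>
      result ++ [(PySem.List.pyGetD courses_list el ("", ("", 0))).1 ++ " - " ++ PySem.Int.toStr kv.1 ++ " месяцев"]) result) []

-- ===== PORT B =====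
def ordered_sequence_alt (courses : List String) (mentors : List String) (durations : List Int) : List String :=
  let triples := PySem.List.sorted (courses.zip (mentors.zip durations)) (fun t => t.2.2)
  triples.map (fun t => t.1 ++ " - " ++ PySem.Int.toStr t.2.2 ++ " месяцев")

-- ===== PRECONDITION & SPEC =====
def Spec_ordered_sequence (courses : List String) (mentors : List String) (durations : List Int) (out : List String) : Prop := out = ordered_sequence_alt courses mentors durations
instance (courses : List String) (mentors : List String) (durations : List Int) (out : List String) : Decidable (Spec_ordered_sequence courses mentors durations out) := by unfold Spec_ordered_sequence; infer_instance

-- ===== CLAIM (what is proved, stated in full; the proofs are below) =====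
def Claim_equal_ordered_sequence : Prop := ∀ (courses : List String) (mentors : List String) (durations : List Int), Dom_ordered_sequence courses mentors durations → Spec_ordered_sequence courses mentors durations (ordered_sequence courses mentors durations)

-- ===== LEMMAS AND PROOFS =====

theorem insertBy_nil {α : Type} (before : α → α → Bool) (x : α) :
    PySem.List.insertBy before x [] = [x] := rfl

theorem insertBy_cons {α : Type} (before : α → α → Bool) (x y : α) (ys : List α) :
    PySem.List.insertBy before x (y :: ys) =
      if before x y then x :: y :: ys else y :: PySem.List.insertBy before x ys := rfl

theorem insertBy_append_left {α : Type} (before : α → α → Bool) (x : α) (A B : List α)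
    (h : ∀ a ∈ A, before x a = false) :
    PySem.List.insertBy before x (A ++ B) = A ++ PySem.List.insertBy before x B := by
  induction A with
  | nil => simp
  | cons a A ih =>
      simp only [List.cons_append, insertBy_cons, h a (by simp)]
      simp only [if_neg Bool.false_ne_true]
      rw [ih (fun a ha => h a (by simp [ha]))]

theorem insertBy_all_before {α : Type} (before : α → α → Bool) (x : α) (B : List α)
    (h : ∀ y ∈ B, before x y = true) :
    PySem.List.insertBy before x B = x :: B := by
  cases B with
  | nil => rfl
  | cons b B => rw [insertBy_cons, if_pos (h b (by simp))]

-- inserting x into the grouped list when its key already has a group: x goes to the end of its group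
theorem insertBy_flatMap_mem {α : Type} (key : α → Int) (x : α) :
    ∀ (ks : List Int) (g : Int → List α), ks.Pairwise (· < ·) →
    (∀ k ∈ ks, ∀ y ∈ g k, key y = k) → key x ∈ ks →
    PySem.List.insertBy (fun a b => decide (key a < key b)) x (ks.flatMap g)
      = ks.flatMap (fun k => g k ++ if key x == k then [x] else []) := by
  intro ks
  induction ks with
  | nil => intro g _ _ hx; simp at hx
  | cons k ks ih =>
      intro g hpw hg hx
      have hgk : ∀ a ∈ g k, (decide (key x < key a)) = false := by
        intro a ha
        have hk := hg k (by simp) a ha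
        by_cases hxk : key x = k
        · simp [hk, hxk]
        · have hx' : key x ∈ ks := (List.mem_cons.mp hx).resolve_left hxk
          have : k < key x := (List.pairwise_cons.mp hpw).1 _ hx'
          simp only [hk, decide_eq_false_iff_not]; omega
      rw [List.flatMap_cons, insertBy_append_left _ _ _ _ hgk, List.flatMap_cons]
      by_cases hxk : key x = k
      · have hall : ∀ y ∈ ks.flatMap g, (decide (key x < key y)) = true := by
          intro y hy
          rcases List.mem_flatMap.mp hy with ⟨k', hk', hyk'⟩
          have hky := hg k' (by simp [hk']) y hyk'
          have hlt : k < k' := (List.pairwise_cons.mp hpw).1 _ hk'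
          simp only [hky, hxk, decide_eq_true_eq]; omega
        rw [insertBy_all_before _ _ _ hall]
        have hflat : (ks.flatMap fun k' => g k' ++ if key x == k' then [x] else []) = ks.flatMap g := by
          apply List.flatMap_congr
          intro k' hk'
          have hlt : k < k' := (List.pairwise_cons.mp hpw).1 _ hk'
          have : (key x == k') = false := by simp only [beq_eq_false_iff_ne, ne_eq, hxk]; omega
          simp [this]
        rw [hflat, if_pos (beq_iff_eq.mpr hxk)]
        simp
      · have hx' : key x ∈ ks := (List.mem_cons.mp hx).resolve_left hxk
        rw [ih g (List.pairwise_cons.mp hpw).2 (fun k' hk' => hg k' (by simp [hk'])) hx']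
        rw [if_neg (by simp [hxk])]
        simp

-- inserting x into the grouped list when its key is fresh: a new singleton group appears where
-- the key sorts into the key list
theorem insertBy_flatMap_fresh {α : Type} (key : α → Int) (x : α) :
    ∀ (ks : List Int) (g : Int → List α), ks.Pairwise (· < ·) →
    (∀ k ∈ ks, ∀ y ∈ g k, key y = k) → key x ∉ ks → g (key x) = [] →
    PySem.List.insertBy (fun a b => decide (key a < key b)) x (ks.flatMap g)
      = (PySem.List.insertBy (fun a b => decide (a < b)) (key x) ks).flatMap
          (fun k => g k ++ if key x == k then [x] else []) := by
  intro ks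
  induction ks with
  | nil =>
      intro g _ _ _ hg0
      simp [insertBy_nil, hg0]
  | cons k ks ih =>
      intro g hpw hg hx hg0
      have hxk : key x ≠ k := fun h => hx (by simp [h])
      rw [List.flatMap_cons, insertBy_cons]
      by_cases hlt : key x < k
      · have hall : ∀ y ∈ g k ++ ks.flatMap g, (decide (key x < key y)) = true := by
          intro y hy
          rcases List.mem_append.mp hy with hy | hy
          · have := hg k (by simp) y hy; simp only [this, decide_eq_true_eq]; omega
          · rcases List.mem_flatMap.mp hy with ⟨k', hk', hyk'⟩
            have hky := hg k' (by simp [hk']) y hyk'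
            have : k < k' := (List.pairwise_cons.mp hpw).1 _ hk'
            simp only [hky, decide_eq_true_eq]; omega
        rw [if_pos (by simp [hlt]), insertBy_all_before _ _ _ hall]
        have hflat : ((k :: ks).flatMap fun k' => g k' ++ if key x == k' then [x] else [])
            = (k :: ks).flatMap g := by
          apply List.flatMap_congr
          intro k' hk'
          have : (key x == k') = false := by
            simp only [beq_eq_false_iff_ne, ne_eq]
            intro h; exact hx (h ▸ hk')
          simp [this]
        rw [List.flatMap_cons, hflat, if_pos (beq_iff_eq.mpr rfl), hg0, List.flatMap_cons]
        simp
      · have hgt : k < key x := by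
          rcases lt_or_ge k (key x) with h | h
          · exact h
          · exact absurd (lt_of_le_of_ne h hxk) hlt
        have hgk : ∀ a ∈ g k, (decide (key x < key a)) = false := by
          intro a ha
          have := hg k (by simp) a ha
          simp only [this, decide_eq_false_iff_not]; omega
        rw [if_neg (by simp; omega), List.flatMap_cons,
            insertBy_append_left _ _ _ _ hgk,
            ih g (List.pairwise_cons.mp hpw).2 (fun k' hk' => hg k' (by simp [hk']))
              (fun h => hx (by simp [h])) hg0,
            if_neg (by simp [hxk])]
        simp

theorem sorted_append_singleton {α κ : Type} [LT κ] [DecidableLT κ] (xs : List α) (x : α) (key : α → κ) :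
    PySem.List.sorted (xs ++ [x]) key
      = PySem.List.insertBy (fun a b => decide (key a < key b)) x (PySem.List.sorted xs key) := by
  rw [PySem.List.sorted_eq_foldl_insertBy, PySem.List.sorted_eq_foldl_insertBy, List.foldl_append]
  rfl

theorem setOfList_append_singleton {α : Type} [BEq α] (L : List α) (a : α) :
    PySem.Set.ofList (L ++ [a]) = PySem.Set.add (PySem.Set.ofList L) a := by
  rw [PySem.Set.ofList_eq_foldl, PySem.Set.ofList_eq_foldl, List.foldl_append]
  rfl

-- a stable sort by an Int key is the concatenation, over the sorted distinct keys, of the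
-- key's elements in original order
theorem sorted_groups {α : Type} (xs : List α) (key : α → Int) :
    PySem.List.sorted xs key =
      (PySem.List.sorted (PySem.Set.ofList (xs.map key)) (fun k => k)).flatMap
        (fun k => xs.filter (fun y => key y == k)) := by
  induction xs using List.reverseRecOn with
  | nil => rfl
  | append_singleton l x ih =>
      rw [sorted_append_singleton, ih, List.map_append, List.map_cons, List.map_nil,
          setOfList_append_singleton]
      have hpw : (PySem.List.sorted (PySem.Set.ofList (l.map key)) (fun k => k)).Pairwise (· < ·) :=
        PySem.List.sorted_ofList_pairwise_lt _
      have hg : ∀ k ∈ PySem.List.sorted (PySem.Set.ofList (l.map key)) (fun k => k),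
          ∀ y ∈ l.filter (fun y => key y == k), key y = k := by
        intro k _ y hy
        exact beq_iff_eq.mp (List.mem_filter.mp hy).2
      have hfilt : ∀ k : Int, (l ++ [x]).filter (fun y => key y == k)
          = l.filter (fun y => key y == k) ++ if key x == k then [x] else [] := by
        intro k
        rw [List.filter_append]
        congr 1
        by_cases h : key x = k
        · simp [List.filter, h]
        · have hb : (key x == k) = false := beq_eq_false_iff_ne.mpr h
          simp [List.filter, hb]
      by_cases hmem : key x ∈ l.map key
      · have hadd : PySem.Set.add (PySem.Set.ofList (l.map key)) (key x)
            = PySem.Set.ofList (l.map key) := by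
          have : key x ∈ PySem.Set.ofList (l.map key) := (PySem.Set.mem_ofList _ _).mpr hmem
          simp [PySem.Set.add, PySem.Set.contains, this]
        rw [hadd, insertBy_flatMap_mem key x _ _ hpw hg
            ((PySem.List.mem_sorted _ _ _ _).mpr ((PySem.Set.mem_ofList _ _).mpr hmem))]
        apply List.flatMap_congr
        intro k _
        rw [hfilt k]
      · have hadd : PySem.Set.add (PySem.Set.ofList (l.map key)) (key x)
            = PySem.Set.ofList (l.map key) ++ [key x] := by
          have : key x ∉ PySem.Set.ofList (l.map key) := fun h => hmem ((PySem.Set.mem_ofList _ _).mp h)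
          simp [PySem.Set.add, PySem.Set.contains, this]
        have hg0 : l.filter (fun y => key y == key x) = [] := by
          rw [List.filter_eq_nil_iff]
          intro y hy
          simp only [beq_iff_eq]
          intro h
          exact hmem (h ▸ List.mem_map_of_mem hy)
        rw [hadd, sorted_append_singleton,
            insertBy_flatMap_fresh key x _ _ hpw hg
              (fun h => hmem ((PySem.Set.mem_ofList _ _).mp ((PySem.List.mem_sorted _ _ _ _).mp h)))
              hg0]
        apply List.flatMap_congr
        intro k _
        rw [hfilt k]

theorem dict_fold_eq {trip : List (String × String × Int)} :
    (PySem.List.enumerate trip).foldl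
        (fun d p => if d.contains p.2.2.2 then d.insert p.2.2.2 (d.getD p.2.2.2 [] ++ [p.1])
                    else d.insert p.2.2.2 [p.1]) PySem.Dict.empty
      = ((PySem.List.enumerate trip).map (fun p => (p.2.2.2, p.1))).foldl
          (fun d q => d.modify q.1 [] (fun v => v ++ [q.2])) PySem.Dict.empty := by
  rw [List.foldl_map]
  apply PySem.List.foldl_congr_mem
  intro acc p _
  by_cases h : acc.contains p.2.2.2 = true
  · rw [if_pos h]; rfl
  · rw [if_neg h, PySem.Dict.modify,
        PySem.Dict.getD_of_not_contains _ _ (Bool.eq_false_iff.mpr h), List.nil_append]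

theorem glue (trip : List (String × String × Int)) :
    (PySem.List.sorted
      ((PySem.List.enumerate trip).foldl
        (fun d p => if d.contains p.2.2.2 then d.insert p.2.2.2 (d.getD p.2.2.2 [] ++ [p.1])
                    else d.insert p.2.2.2 [p.1]) PySem.Dict.empty).items (fun kv => kv.1)).foldl
      (fun result kv => kv.2.foldl (fun result el =>
        result ++ [(PySem.List.pyGetD trip el ("", ("", 0))).1 ++ " - " ++ PySem.Int.toStr kv.1 ++ " месяцев"]) result) []
    = (PySem.List.sorted trip (fun t => t.2.2)).map
        (fun t => t.1 ++ " - " ++ PySem.Int.toStr t.2.2 ++ " месяцев") := by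
  rw [dict_fold_eq]
  set lp := (PySem.List.enumerate trip).map (fun p => (p.2.2.2, p.1)) with hlp
  set D := lp.foldl (fun d q => d.modify q.1 [] (fun v => v ++ [q.2])) PySem.Dict.empty with hD
  have hmapfst : lp.map (fun q => q.1) = trip.map (fun t => t.2.2) := by
    rw [hlp, List.map_map]
    have : ((fun q : Int × Int => q.1) ∘ fun p : Int × (String × String × Int) => (p.2.2.2, p.1))
        = (fun t : String × String × Int => t.2.2) ∘ (fun p : Int × (String × String × Int) => p.2) := rfl
    rw [this, ← List.map_map, PySem.List.map_snd_enumerate]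
  have hkeys : D.keys = PySem.Set.ofList (trip.map (fun t => t.2.2)) := by
    rw [hD, PySem.Dict.keys_foldl_modify_key lp (fun q => q.1) [] (fun _ q => fun v => v ++ [q.2])
          PySem.Dict.empty, PySem.Dict.keys_empty, hmapfst, PySem.Set.ofList_eq_foldl]
    rfl
  have hnodup : D.keys.Nodup := by
    rw [hD]
    exact PySem.Dict.nodup_keys_foldl_modify_key lp (fun q => q.1) [] (fun _ q => fun v => v ++ [q.2])
      PySem.Dict.empty PySem.Dict.nodup_keys_empty
  have hgetD : ∀ k : Int, D.getD k [] = (lp.filter (fun q => q.1 == k)).map (fun q => q.2) := by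
    intro k
    rw [hD, PySem.Dict.getD_foldl_modify_append lp PySem.Dict.empty k, PySem.Dict.getD_empty,
        List.nil_append]
  have hsorted : PySem.List.sorted D.items (fun kv => kv.1)
      = (PySem.List.sorted (PySem.Set.ofList (trip.map (fun t => t.2.2))) (fun k => k)).map
          (fun k => (k, D.getD k [])) := by
    apply PySem.List.sorted_eq_of_perm_of_pairwise_lt
    · rw [PySem.Dict.items_eq_map_keys D hnodup [], hkeys]
      exact (PySem.List.sorted_perm _ _ _).map _
    · rw [List.pairwise_map]
      exact PySem.List.sorted_ofList_pairwise_lt _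
  rw [hsorted]
  simp only [PySem.List.foldl_append_singleton_eq_map]
  rw [PySem.List.foldl_append_eq_flatMap, List.nil_append, List.flatMap_map,
      sorted_groups trip (fun t => t.2.2), List.map_flatMap]
  apply List.flatMap_congr
  intro k _
  show (D.getD k []).map
        (fun el => (PySem.List.pyGetD trip el ("", ("", 0))).1 ++ " - " ++ PySem.Int.toStr k ++ " месяцев")
      = (trip.filter (fun y => y.2.2 == k)).map
          (fun t => t.1 ++ " - " ++ PySem.Int.toStr t.2.2 ++ " месяцев")
  rw [hgetD k, hlp, List.filter_map, List.map_map, List.map_map]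
  have hQ : ((fun q : Int × Int => q.1 == k) ∘ fun p : Int × (String × String × Int) => (p.2.2.2, p.1))
      = fun p : Int × (String × String × Int) => p.2.2.2 == k := rfl
  have hcomp : (((fun el => (PySem.List.pyGetD trip el ("", ("", 0))).1 ++ " - " ++ PySem.Int.toStr k ++ " месяцев") ∘
        (fun q : Int × Int => q.2)) ∘ fun p : Int × (String × String × Int) => (p.2.2.2, p.1))
      = fun p : Int × (String × String × Int) =>
          (PySem.List.pyGetD trip p.1 ("", ("", 0))).1 ++ " - " ++ PySem.Int.toStr k ++ " месяцев" := rfl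
  rw [hQ, hcomp]
  have hcong : ∀ p ∈ (PySem.List.enumerate trip).filter (fun p => p.2.2.2 == k),
      (PySem.List.pyGetD trip p.1 ("", ("", 0))).1 ++ " - " ++ PySem.Int.toStr k ++ " месяцев"
        = ((fun t : String × String × Int => t.1 ++ " - " ++ PySem.Int.toStr t.2.2 ++ " месяцев") ∘
            (fun p : Int × (String × String × Int) => p.2)) p := by
    intro p hp
    have hpm := List.mem_filter.mp hp
    have hk : p.2.2.2 = k := beq_iff_eq.mp hpm.2
    rcases (PySem.List.mem_enumerate_iff trip 0 p).mp hpm.1 with ⟨j, hj, hpj⟩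
    subst hpj
    simp only [Function.comp]
    rw [zero_add, PySem.List.pyGetD_natCast, List.getD_eq_getElem trip _ hj, ← hk]
  rw [List.map_congr_left hcong, ← List.map_map]
  congr 1
  have hfm := List.filter_map (f := fun p : Int × (String × String × Int) => p.2)
    (p := fun y : String × String × Int => y.2.2 == k) (l := PySem.List.enumerate trip)
  rw [PySem.List.map_snd_enumerate] at hfm
  exact hfm.symm

theorem ordered_sequence_spec : Claim_equal_ordered_sequence := by
  intro courses mentors durations _
  unfold Spec_ordered_sequence ordered_sequence ordered_sequence_alt
  rw [PySem.List.foldl_append_singleton_eq_self, List.nil_append]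
  exact glue (courses.zip (mentors.zip durations))
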